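-- pv_equiv track=rewrite | github.com/mjavadhm/DS | encoder.py | binsert
-- ===== SOURCE A (Python) =====
-- def binsert(frequent, fre,letter,letters):
--     low = 0
--     high = len(frequent) - 1
--
--     while low <= high:
--         mid = (low + high) // 2
--         if frequent[mid] < fre:
--             low = mid + 1
--         else:
--             high = mid - 1
--
--     frequent.insert(low, fre)
--     letters.insert(low, letter)
--     return frequent ,letters
-- ===== SOURCE B (Python) =====
-- def binsert(frequent, fre, letter, letters):
--     # Linear scan for the leftmost position whose value is >= fre
--     # (same position as bisect_left on a sorted list), then insert in place.
--     idx = len(frequent)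
--     for i, v in enumerate(frequent):
--         if v >= fre:
--             idx = i
--             break
--     frequent.insert(idx, fre)
--     letters.insert(idx, letter)
--     return frequent, letters
-- ===== Notes on version B (the rewrite author's own statement) =====
-- stated objective: simpler
-- what changed: Replaces the low/high binary-search loop with a single left-to-right scan that stops at the first element >= fre (defaulting to len(frequent)), then does the same two inserts.
-- outside the precondition, e.g. on binsert([3, 1, 2], 2, 'a', []): A returns ([3, 1, 2, 2], ['a']), B returns ([2, 3, 1, 2], ['a'])
import Mathlib
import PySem

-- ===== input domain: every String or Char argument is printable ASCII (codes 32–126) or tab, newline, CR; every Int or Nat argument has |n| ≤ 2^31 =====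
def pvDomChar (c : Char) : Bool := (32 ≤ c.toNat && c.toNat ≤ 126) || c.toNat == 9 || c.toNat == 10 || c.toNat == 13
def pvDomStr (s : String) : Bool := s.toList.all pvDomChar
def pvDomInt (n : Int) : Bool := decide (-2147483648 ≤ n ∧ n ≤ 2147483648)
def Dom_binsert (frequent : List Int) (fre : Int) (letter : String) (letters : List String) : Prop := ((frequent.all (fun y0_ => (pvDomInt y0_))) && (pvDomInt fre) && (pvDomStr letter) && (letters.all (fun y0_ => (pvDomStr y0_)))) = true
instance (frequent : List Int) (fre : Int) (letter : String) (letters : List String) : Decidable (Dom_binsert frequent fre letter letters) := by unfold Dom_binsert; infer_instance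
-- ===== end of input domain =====

-- B replaces A's binary search by a linear scan for the leftmost element ≥ fre (same insertion
-- position on sorted input); both programs mutate `frequent`/`letters` in place in Python, and
-- B performs the same mutation, so the equivalence is about the returned pair.

-- ===== PORT A =====
-- while low <= high: mid = (low+high)//2; if frequent[mid] < fre: low = mid+1 else: high = mid-1
def binsertLoop (frequent : List Int) (fre : Int) (low high : Int) : Int :=
  if h : low ≤ high then
    match PySem.List.pyGet? frequent (PySem.Int.floordiv (low + high) 2) with
    | some v =>
        if v < fre then binsertLoop frequent fre (PySem.Int.floordiv (low + high) 2 + 1) high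
        else binsertLoop frequent fre low (PySem.Int.floordiv (low + high) 2 - 1)
    | none => low   -- IndexError in Python; unreachable from binsert's call (0 ≤ low ≤ high < length)
  else low
termination_by (high + 1 - low).toNat
decreasing_by
  all_goals have hb := PySem.Int.floordiv_two_mid_bounds h; omega

def binsert (frequent : List Int) (fre : Int) (letter : String) (letters : List String) : List Int × List String :=
  let low := binsertLoop frequent fre 0 ((frequent.length : Int) - 1)
  (PySem.List.insert frequent low fre, PySem.List.insert letters low letter)

-- ===== PORT B =====
-- for i, v in enumerate(frequent): if v >= fre: idx = i; break   (else idx = len(frequent))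
def scanLoop (rest : List Int) (fre : Int) (i n : Int) : Int :=
  match rest with
  | [] => n
  | v :: tl => if fre ≤ v then i else scanLoop tl fre (i + 1) n

def binsert_alt (frequent : List Int) (fre : Int) (letter : String) (letters : List String) : List Int × List String :=
  let idx := scanLoop frequent fre 0 (frequent.length : Int)
  (PySem.List.insert frequent idx fre, PySem.List.insert letters idx letter)

-- ===== PRECONDITION & SPEC =====
-- Pre_ excludes lists of length ≥ 3 in which some element ≥ fre precedes an element < fre: A's binary
-- search assumes sorted input, and on such lists the index its probe sequence lands on is an accidental
-- artefact that no caller would specify; B inserts at the first element ≥ fre there. All sorted lists,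
-- all lists partitioned below/above fre, and all lists of length ≤ 2 satisfy Pre_.
def Pre_binsert (frequent : List Int) (fre : Int) (letter : String) (letters : List String) : Prop :=
  frequent.Pairwise (fun a b => a < fre ∨ fre ≤ b) ∨ frequent.length ≤ 2
instance (frequent : List Int) (fre : Int) (letter : String) (letters : List String) : Decidable (Pre_binsert frequent fre letter letters) := by unfold Pre_binsert; infer_instance

def pvWitness_binsert : List Int × Int × String × List String := ([1, 2, 2, 5], 2, "a", ["w", "x", "y", "z"])

def Spec_binsert (frequent : List Int) (fre : Int) (letter : String) (letters : List String) (out : List Int × List String) : Prop := out = binsert_alt frequent fre letter letters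
instance (frequent : List Int) (fre : Int) (letter : String) (letters : List String) (out : List Int × List String) : Decidable (Spec_binsert frequent fre letter letters out) := by unfold Spec_binsert; infer_instance

-- ===== CLAIM (what is proved, stated in full; the proofs are below) =====
def Claim_equal_binsert : Prop := ∀ (frequent : List Int) (fre : Int) (letter : String) (letters : List String), Dom_binsert frequent fre letter letters → Pre_binsert frequent fre letter letters → Spec_binsert frequent fre letter letters (binsert frequent fre letter letters)

-- ===== LEMMAS AND PROOFS =====

-- The binary search, started with a valid bracket on a fre-partitioned list, returns the boundary index.
lemma bs_spec (l : List Int) (fre : Int) (hs : l.Pairwise (fun a b => a < fre ∨ fre ≤ b)) :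
    ∀ (low high : Int), 0 ≤ low → high ≤ (l.length : Int) - 1 → low ≤ high + 1 →
    (∀ j : Nat, (hj : j < l.length) → (j : Int) < low → l[j] < fre) →
    (∀ j : Nat, (hj : j < l.length) → high < (j : Int) → fre ≤ l[j]) →
    0 ≤ binsertLoop l fre low high ∧ binsertLoop l fre low high ≤ (l.length : Int) ∧
    (∀ j : Nat, (hj : j < l.length) → (j : Int) < binsertLoop l fre low high → l[j] < fre) ∧
    (∀ j : Nat, (hj : j < l.length) → binsertLoop l fre low high ≤ (j : Int) → fre ≤ l[j]) := by
  intro low high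
  fun_induction binsertLoop l fre low high with
  | case1 low high h v heq hv ih =>
      intro h0 h1 h2 hl hh
      have hb := PySem.Int.floordiv_two_mid_bounds h
      set mid := PySem.Int.floordiv (low + high) 2 with hmid
      have hmlt : mid < (l.length : Int) := by omega
      have hm0 : 0 ≤ mid := by omega
      have hvv : v = l[mid.toNat]'(by omega) := by
        rw [PySem.List.pyGet?_eq_some_getElem l hm0 hmlt] at heq
        exact (Option.some_inj.mp heq).symm
      refine ih (by omega) h1 (by omega) ?_ hh
      intro j hj hjm
      rcases Int.lt_or_le (j : Int) low with hc | hc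
      · exact hl j hj hc
      · have hmf : l[mid.toNat]'(by omega) < fre := hvv ▸ hv
        rcases Nat.lt_or_ge j mid.toNat with hjlt | hjge
        · rcases List.pairwise_iff_getElem.mp hs j mid.toNat hj (by omega) hjlt with hx | hx
          · exact hx
          · omega
        · have : j = mid.toNat := by omega
          exact this ▸ hmf
  | case2 low high h v heq hv ih =>
      intro h0 h1 h2 hl hh
      have hb := PySem.Int.floordiv_two_mid_bounds h
      set mid := PySem.Int.floordiv (low + high) 2 with hmid
      have hmlt : mid < (l.length : Int) := by omega
      have hm0 : 0 ≤ mid := by omega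
      have hvv : v = l[mid.toNat]'(by omega) := by
        rw [PySem.List.pyGet?_eq_some_getElem l hm0 hmlt] at heq
        exact (Option.some_inj.mp heq).symm
      refine ih h0 (by omega) (by omega) hl ?_
      intro j hj hjm
      have hge : fre ≤ l[mid.toNat]'(by omega) := hvv ▸ (le_of_not_gt hv)
      rcases Nat.lt_or_ge mid.toNat j with hjlt | hjge
      · rcases List.pairwise_iff_getElem.mp hs mid.toNat j (by omega) hj hjlt with hx | hx
        · omega
        · exact hx
      · have : j = mid.toNat := by omega
        exact this ▸ hge
  | case3 low high h heq =>
      intro h0 h1 h2 hl hh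
      have hb := PySem.Int.floordiv_two_mid_bounds h
      set mid := PySem.Int.floordiv (low + high) 2 with hmid
      rw [PySem.List.pyGet?_eq_some_getElem l (by omega) (by omega)] at heq
      exact absurd heq (by simp)
  | case4 low high h =>
      intro h0 h1 h2 hl hh
      refine ⟨h0, by omega, hl, ?_⟩
      intro j hj hjr
      exact hh j hj (by omega)

-- The linear scan returns the first index at which fre ≤ element (n if none).
lemma scan_spec (fre : Int) (rest : List Int) :
    ∀ (i n : Int), n = i + (rest.length : Int) →
    i ≤ scanLoop rest fre i n ∧ scanLoop rest fre i n ≤ n ∧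
    (∀ j : Nat, (hj : j < rest.length) → (i + (j : Int)) < scanLoop rest fre i n → rest[j] < fre) ∧
    (scanLoop rest fre i n < n → ∃ j : Nat, ∃ hj : j < rest.length, (i + (j : Int)) = scanLoop rest fre i n ∧ fre ≤ rest[j]) := by
  induction rest with
  | nil =>
      intro i n hn
      simp [scanLoop] at *
      omega
  | cons v tl ih =>
      intro i n hn
      simp only [scanLoop]
      by_cases hv : fre ≤ v
      · simp only [hv, if_pos]
        refine ⟨le_refl _, by simp at hn; omega, ?_, ?_⟩
        · intro j hj hji; omega
        · intro _; exact ⟨0, by simp, by simp [hv]⟩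
      · simp only [hv, if_false]
        obtain ⟨ih1, ih2, ih3, ih4⟩ := ih (i + 1) n (by simp at hn ⊢; omega)
        refine ⟨by omega, ih2, ?_, ?_⟩
        · intro j hj hji
          match j, hj with
          | 0, _ => simpa using lt_of_not_ge hv
          | (j' + 1), hj =>
              have := ih3 j' (by simpa using hj) (by push_cast at hji ⊢; omega)
              simpa using this
        · intro hlt
          obtain ⟨j', hj', hje, hge⟩ := ih4 hlt
          exact ⟨j' + 1, by simpa using hj', by push_cast at hje ⊢; omega, by simpa using hge⟩

-- On fre-partitioned input the two index computations agree.
lemma idx_eq (l : List Int) (fre : Int) (hs : l.Pairwise (fun a b => a < fre ∨ fre ≤ b)) :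
    binsertLoop l fre 0 ((l.length : Int) - 1) = scanLoop l fre 0 (l.length : Int) := by
  obtain ⟨hr0, hr1, hr2, hr3⟩ := bs_spec l fre hs 0 ((l.length : Int) - 1) (by omega) (by omega) (by omega)
    (by intro j hj hjl; omega) (by intro j hj hjl; omega)
  obtain ⟨hs0, hs1, hs2, hs3⟩ := scan_spec fre l 0 (l.length : Int) (by omega)
  set r := binsertLoop l fre 0 ((l.length : Int) - 1)
  set s := scanLoop l fre 0 (l.length : Int)
  rcases lt_trichotomy r s with h | h | h
  · -- r < s : l[r] < fre (scan) yet fre ≤ l[r] (search)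
    have hrn : r.toNat < l.length := by omega
    have h1 := hs2 r.toNat hrn (by omega)
    have h2 := hr3 r.toNat hrn (by omega)
    omega
  · exact h
  · -- s < r : fre ≤ l[j] at j with i+j = s (scan) yet l[j] < fre (search)
    obtain ⟨j, hj, hje, hge⟩ := hs3 (by omega)
    have := hr2 j hj (by omega)
    omega

-- Lists of length ≤ 2 need no sortedness: the two index computations agree by case analysis.
lemma idx_eq_small (l : List Int) (fre : Int) (hl : l.length ≤ 2) :
    binsertLoop l fre 0 ((l.length : Int) - 1) = scanLoop l fre 0 (l.length : Int) := by
  match l with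
  | [] => simp [binsertLoop, scanLoop]
  | [a] =>
      by_cases h : a < fre <;>
        simp [binsertLoop, scanLoop, PySem.List.pyGet?, PySem.List.pyIdx?, h,
              show (fre ≤ a ↔ ¬ a < fre) from by omega]
  | [a, b] =>
      by_cases h : a < fre <;> by_cases h' : b < fre <;>
        simp [binsertLoop, scanLoop, PySem.List.pyGet?, PySem.List.pyIdx?, h, h',
              show (fre ≤ a ↔ ¬ a < fre) from by omega,
              show (fre ≤ b ↔ ¬ b < fre) from by omega]
  | a :: b :: c :: tl => simp at hl

-- ===== VERDICT (by name: the statement is the Claim_ definition above) =====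
theorem binsert_spec : Claim_equal_binsert := by
  intro frequent fre letter letters _hdom hpre
  unfold Spec_binsert binsert binsert_alt
  rcases hpre with hs | hsmall
  · rw [idx_eq frequent fre hs]
  · rw [idx_eq_small frequent fre hsmall]
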